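-- pv_equiv track=rewrite | github.com/Pavitra-khare/DA6401_ASS3_withoutAtten- | train.py | assign_tensor_to_generated_sequences
-- ===== SOURCE A (Python) =====
-- def assign_tensor_to_generated_sequences(sequence):
--     # Converts a space-separated string into a single concatenated string.
--     # Also returns the total number of characters across all tokens.
--     tokens = sequence.split()
--
--     def concatenate(tokens):
--         return ''.join(tokens)
--
--     def compute_total_length(tokens):
--         return sum(len(token) for token in tokens)
--
--     combined = concatenate(tokens)
--     total_len = compute_total_length(tokens)
--
--     return combined, total_len
-- ===== SOURCE B (Python) =====
-- def assign_tensor_to_generated_sequences(sequence):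
--     # Single pass over the characters: keep every non-whitespace character
--     # and count them as we go; no tokenization, no second pass.
--     out = []
--     count = 0
--     for ch in sequence:
--         if not ch.isspace():
--             out.append(ch)
--             count += 1
--     return ''.join(out), count
-- ===== Notes on version B (the rewrite author's own statement) =====
-- stated objective: alternative
-- what changed: B replaces A's tokenize-then-join-then-sum pipeline by one character-level scan with an accumulator that collects non-whitespace characters and counts them in the same pass; correctness rests on joining the whitespace-split tokens with the empty separator being exactly the string with all whitespace characters removed.
import Mathlib
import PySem

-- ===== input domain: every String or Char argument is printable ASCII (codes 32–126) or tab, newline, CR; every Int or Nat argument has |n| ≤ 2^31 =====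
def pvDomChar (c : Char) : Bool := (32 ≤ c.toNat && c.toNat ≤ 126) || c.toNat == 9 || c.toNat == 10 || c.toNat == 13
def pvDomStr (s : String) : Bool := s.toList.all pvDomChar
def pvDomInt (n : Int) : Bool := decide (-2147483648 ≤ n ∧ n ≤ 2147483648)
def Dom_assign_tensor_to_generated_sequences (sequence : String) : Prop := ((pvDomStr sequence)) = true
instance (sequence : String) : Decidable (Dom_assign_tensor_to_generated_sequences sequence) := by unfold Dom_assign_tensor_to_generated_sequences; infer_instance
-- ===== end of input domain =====

-- B replaces the tokenize/join/sum pipeline by a single character scan that collects and counts non-whitespace characters: alternative decomposition, same values.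
-- ===== PORT A =====
def pvA_concatenate (tokens : List String) : String :=
  PySem.Str.join "" tokens

def pvA_compute_total_length (tokens : List String) : Int :=
  tokens.foldl (fun acc token => acc + PySem.Str.len token) 0

def assign_tensor_to_generated_sequences (sequence : String) : String × Int :=
  let tokens := PySem.Str.split₀ sequence
  let combined := pvA_concatenate tokens
  let total_len := pvA_compute_total_length tokens
  (combined, total_len)

-- ===== PORT B =====
-- the for-loop over the characters with the (out, count) accumulator
def pvB_loop (chars : List Char) (out : List Char) (count : Int) : List Char × Int :=
  match chars with
  | [] => (out, count)
  | ch :: rest =>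
    if PySem.Chars.isspace ch then pvB_loop rest out count
    else pvB_loop rest (out ++ [ch]) (count + 1)

def assign_tensor_to_generated_sequences_alt (sequence : String) : String × Int :=
  let (out, count) := pvB_loop sequence.toList [] 0
  (String.ofList out, count)

-- ===== PRECONDITION & SPEC =====
def Spec_assign_tensor_to_generated_sequences (sequence : String) (out : String × Int) : Prop := out = assign_tensor_to_generated_sequences_alt sequence
instance (sequence : String) (out : String × Int) : Decidable (Spec_assign_tensor_to_generated_sequences sequence out) := by unfold Spec_assign_tensor_to_generated_sequences; infer_instance

-- ===== CLAIM (what is proved, stated in full; the proofs are below) =====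
def Claim_equal_assign_tensor_to_generated_sequences : Prop := ∀ (sequence : String), Dom_assign_tensor_to_generated_sequences sequence → Spec_assign_tensor_to_generated_sequences sequence (assign_tensor_to_generated_sequences sequence)

-- ===== LEMMAS AND PROOFS =====

-- a ""-join is the flattened list
lemma pv_join_nil (parts : List (List Char)) :
    PySem.Chars.join [] parts = parts.flatten := by
  simp only [PySem.Chars.join, List.intercalate]
  induction parts with
  | nil => simp
  | cons x xs ih => cases xs <;> simp_all [List.intersperse]

-- the flattened words of split₀.go are the non-whitespace characters
lemma pv_go_flatten (s cur : List Char) (acc : List (List Char)) :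
    (PySem.Chars.split₀.go s cur acc).flatten
      = acc.reverse.flatten ++ cur.reverse ++ s.filter (fun c => !PySem.Chars.isspace c) := by
  induction s generalizing cur acc with
  | nil =>
    by_cases h : cur = [] <;>
      simp [PySem.Chars.split₀.go, h, List.isEmpty_iff]
  | cons c rest ih =>
    by_cases hs : PySem.Chars.isspace c
    · by_cases h : cur = [] <;>
        simp [PySem.Chars.split₀.go, hs, h, List.isEmpty_iff, ih]
    · simp [PySem.Chars.split₀.go, hs, ih]

lemma pv_split₀_flatten (s : List Char) :
    (PySem.Chars.split₀ s).flatten = s.filter (fun c => !PySem.Chars.isspace c) := by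
  simpa using pv_go_flatten s [] []

-- sum of token lengths is the flattened length
lemma pv_foldl_len (parts : List String) (acc : Int) :
    parts.foldl (fun a t => a + PySem.Str.len t) acc
      = acc + ((parts.map String.toList).flatten.length : Int) := by
  induction parts generalizing acc with
  | nil => simp
  | cons p ps ih =>
    rw [List.foldl_cons, ih]
    simp [PySem.Str.len_eq]
    ring

-- B's loop collects the filtered characters and their count
lemma pv_loop_eq (chars out : List Char) (count : Int) :
    pvB_loop chars out count
      = (out ++ chars.filter (fun c => !PySem.Chars.isspace c),
         count + ((chars.filter (fun c => !PySem.Chars.isspace c)).length : Int)) := by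
  induction chars generalizing out count with
  | nil => simp [pvB_loop]
  | cons c rest ih =>
    by_cases hs : PySem.Chars.isspace c
    · simp [pvB_loop, hs, ih]
    · simp [pvB_loop, hs, ih]
      ring

-- ===== VERDICT (by name: the statement is the Claim_ definition above) =====
theorem assign_tensor_to_generated_sequences_spec : Claim_equal_assign_tensor_to_generated_sequences := by
  intro sequence _
  unfold Spec_assign_tensor_to_generated_sequences assign_tensor_to_generated_sequences
    assign_tensor_to_generated_sequences_alt pvA_concatenate pvA_compute_total_length
  dsimp only
  rw [pv_foldl_len, pv_loop_eq]
  simp [PySem.Str.join, PySem.Str.split₀, pv_join_nil, pv_split₀_flatten, Function.comp_def]
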